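-- pv_equiv track=rewrite | github.com/gscafo78/repocreate | mirrorreplicator/package_handler.py | parse_packages_data
-- ===== SOURCE A (Python) =====
-- def parse_packages_data(data):
--     packages = []
--     current_package = {}
--     lines = data.splitlines()
--
--     for line in lines:
--         line = line.strip()
--         if not line:
--             if current_package:
--                 packages.append(current_package)
--                 current_package = {}
--         else:
--             if ': ' in line:
--                 key, value = line.split(': ', 1)
--                 current_package[key] = value
--             else:
--                 last_key = next(reversed(current_package), None)
--                 if last_key:
--                     current_package[last_key] += ' ' + line
--
--     if current_package:
--         packages.append(current_package)
--
--     return packages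
-- ===== SOURCE B (Python) =====
-- def _parse_block(lines):
--     d = {}
--     for line in lines:
--         if ': ' in line:
--             key, value = line.split(': ', 1)
--             d[key] = value
--         else:
--             last_key = next(reversed(d), None)
--             if last_key:
--                 d[last_key] += ' ' + line
--     return d
--
--
-- def parse_packages_data(data):
--     stripped = [line.strip() for line in data.splitlines()]
--     blocks = []
--     current = []
--     for line in stripped:
--         if line:
--             current.append(line)
--         elif current:
--             blocks.append(current)
--             current = []
--     if current:
--         blocks.append(current)
--     return [d for d in map(_parse_block, blocks) if d]
-- ===== Notes on version B (the rewrite author's own statement) =====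
-- stated objective: alternative
-- what changed: Replaces A's single flat loop with inline dict-flushing by a two-phase decomposition: first group the stripped lines into blocks cut at blank lines, then parse each block into a dict with a helper and keep the non-empty dicts.
import Mathlib
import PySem

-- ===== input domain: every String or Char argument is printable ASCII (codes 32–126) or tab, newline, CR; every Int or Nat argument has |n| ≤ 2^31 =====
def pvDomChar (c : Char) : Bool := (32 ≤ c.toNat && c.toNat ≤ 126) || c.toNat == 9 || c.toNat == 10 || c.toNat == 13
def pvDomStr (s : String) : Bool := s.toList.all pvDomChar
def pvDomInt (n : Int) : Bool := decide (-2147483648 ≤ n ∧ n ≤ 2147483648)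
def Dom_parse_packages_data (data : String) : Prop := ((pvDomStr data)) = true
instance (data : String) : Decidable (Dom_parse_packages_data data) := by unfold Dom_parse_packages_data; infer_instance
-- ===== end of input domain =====

-- B parses the same blocks in two phases (group stripped lines at blank lines, then parse each
-- block with a helper and keep non-empty dicts) instead of A's single flat loop; same cost.

-- ===== PORT A =====
-- A's loop body over state (packages, current_package)
def pvAStep (st : List (List (String × String)) × PySem.Dict String String) (rawline : String) :
    List (List (String × String)) × PySem.Dict String String :=
  let line := PySem.Str.strip rawline
  if line = "" then
    if st.2.items ≠ [] then (st.1 ++ [st.2.items], PySem.Dict.empty) else st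
  else
    if PySem.Str.isIn ": " line then
      match PySem.Str.splitMax? line ": " 1 with
      | some (key :: value :: _) => (st.1, st.2.insert key value)
      | _ => st          -- unreachable: sep ≠ "" and it occurs, so split gives two parts
    else
      match (PySem.Dict.keys st.2).getLast? with   -- next(reversed(current_package), None)
      | some last_key =>
          if last_key ≠ "" then
            (st.1, st.2.modify last_key "" (fun v => v ++ " " ++ line))
          else st
      | none => st

def parse_packages_data (data : String) : List (List (String × String)) :=
  let st := (PySem.Str.splitlines data).foldl pvAStep ([], PySem.Dict.empty)
  if st.2.items ≠ [] then st.1 ++ [st.2.items] else st.1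

-- ===== PORT B =====
-- _parse_block's loop body: parse one line into the block's dict
def pvParseLine (d : PySem.Dict String String) (line : String) : PySem.Dict String String :=
  if PySem.Str.isIn ": " line then
    match PySem.Str.splitMax? line ": " 1 with
    | some (key :: value :: _) => d.insert key value
    | _ => d           -- unreachable: sep ≠ "" and it occurs, so split gives two parts
  else
    match (PySem.Dict.keys d).getLast? with   -- next(reversed(d), None)
    | some last_key =>
        if last_key ≠ "" then d.modify last_key "" (fun v => v ++ " " ++ line) else d
    | none => d

-- grouping loop body over state (blocks, current)
def pvGroupStep (st : List (List String) × List String) (line : String) :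
    List (List String) × List String :=
  if line ≠ "" then (st.1, st.2 ++ [line])
  else if st.2 ≠ [] then (st.1 ++ [st.2], []) else st

-- _parse_block: fold the per-line parsing rule over the block's lines, return the dict's items
def pvParseBlock (lines : List String) : List (String × String) :=
  (lines.foldl pvParseLine PySem.Dict.empty).items

def parse_packages_data_alt (data : String) : List (List (String × String)) :=
  let stripped := (PySem.Str.splitlines data).map PySem.Str.strip
  let st := stripped.foldl pvGroupStep ([], [])
  let blocks := if st.2 ≠ [] then st.1 ++ [st.2] else st.1
  (blocks.map pvParseBlock).filter (fun d => decide (d ≠ []))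

-- ===== PRECONDITION & SPEC =====
def Spec_parse_packages_data (data : String) (out : List (List (String × String))) : Prop := out = parse_packages_data_alt data
instance (data : String) (out : List (List (String × String))) : Decidable (Spec_parse_packages_data data out) := by unfold Spec_parse_packages_data; infer_instance

-- ===== CLAIM (what is proved, stated in full; the proofs are below) =====
def Claim_equal_parse_packages_data : Prop := ∀ (data : String), Dom_parse_packages_data data → Spec_parse_packages_data data (parse_packages_data data)

-- ===== LEMMAS AND PROOFS =====

-- group accumulator lemma: the blocks accumulator only prepends
set_option maxRecDepth 4096 in
theorem pvGroup_acc (lines : List String) (bs : List (List String)) (cur : List String) :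
    lines.foldl pvGroupStep (bs, cur)
      = (bs ++ (lines.foldl pvGroupStep ([], cur)).1, (lines.foldl pvGroupStep ([], cur)).2) := by
  induction lines generalizing bs cur with
  | nil => simp
  | cons l ls ih =>
      simp only [List.foldl_cons]
      by_cases hl : l = ""
      · by_cases hc : cur = []
        · rw [show pvGroupStep (bs, cur) l = (bs, cur) by simp [pvGroupStep, hl, hc],
              show pvGroupStep (([] : List (List String)), cur) l = ([], cur) by
                simp [pvGroupStep, hl, hc]]
          exact ih bs cur
        · rw [show pvGroupStep (bs, cur) l = (bs ++ [cur], []) by simp [pvGroupStep, hl, hc],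
              show pvGroupStep (([] : List (List String)), cur) l = ([cur], []) by
                simp [pvGroupStep, hl, hc],
              ih (bs ++ [cur]) [], ih [cur] []]
          simp
      · rw [show pvGroupStep (bs, cur) l = (bs, cur ++ [l]) by simp [pvGroupStep, hl],
            show pvGroupStep (([] : List (List String)), cur) l = ([], cur ++ [l]) by
              simp [pvGroupStep, hl]]
        exact ih bs (cur ++ [l])

-- on a non-blank stripped line, A's loop body is exactly B's per-line parsing rule
theorem pvAStep_nonblank (pkgs : List (List (String × String)))
    (d : PySem.Dict String String) (l : String) (hl : PySem.Str.strip l ≠ "") :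
    pvAStep (pkgs, d) l = (pkgs, pvParseLine d (PySem.Str.strip l)) := by
  simp only [pvAStep, pvParseLine, if_neg hl]
  split
  · split <;> rfl
  · split
    · split <;> rfl
    · rfl

-- empty items means the dict is empty
theorem pvDict_items_nil {d : PySem.Dict String String} (h : d.items = []) :
    d = PySem.Dict.empty := by
  apply PySem.Dict.ext; simp [h, PySem.Dict.empty]

-- main invariant: A's flat loop from (pkgs, dict-of-curLines) computes pkgs ++ the
-- parsed, non-empty blocks that B's grouping of the stripped lines produces from curLines
theorem pvMain (rawlines : List String) (pkgs : List (List (String × String)))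
    (curLines : List String) :
    (let st := rawlines.foldl pvAStep (pkgs, curLines.foldl pvParseLine PySem.Dict.empty);
     if st.2.items ≠ [] then st.1 ++ [st.2.items] else st.1)
      = pkgs ++
        ((let st := (rawlines.map PySem.Str.strip).foldl pvGroupStep ([], curLines);
          if st.2 ≠ [] then st.1 ++ [st.2] else st.1).map pvParseBlock).filter
          (fun d => decide (d ≠ [])) := by
  induction rawlines generalizing pkgs curLines with
  | nil =>
      by_cases hc : curLines = []
      · simp [hc, PySem.Dict.empty]
      · simp only [List.foldl_nil, List.map_nil]
        by_cases hi : (curLines.foldl pvParseLine PySem.Dict.empty).items = []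
        · simp [hi, pvParseBlock, hc]
        · simp [hi, pvParseBlock, hc]
  | cons l ls ih =>
      simp only [List.foldl_cons, List.map_cons]
      by_cases hl : PySem.Str.strip l = ""
      · -- blank (after strip) line
        by_cases hi : (curLines.foldl pvParseLine PySem.Dict.empty).items = []
        · -- current dict empty: A keeps state; B's block (if any) is filtered out
          have hA : pvAStep (pkgs, curLines.foldl pvParseLine PySem.Dict.empty) l
              = (pkgs, curLines.foldl pvParseLine PySem.Dict.empty) := by
            simp [pvAStep, hl, hi]
          rw [hA, show curLines.foldl pvParseLine PySem.Dict.empty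
                = List.foldl pvParseLine PySem.Dict.empty [] from (pvDict_items_nil hi), ih]
          by_cases hc : curLines = []
          · simp [pvGroupStep, hl, hc]
          · rw [show pvGroupStep (([] : List (List String)), curLines) (PySem.Str.strip l)
                  = ([curLines], []) by simp [pvGroupStep, hl, hc],
                pvGroup_acc ((ls.map PySem.Str.strip)) [curLines] []]
            have hpb : pvParseBlock curLines = [] := hi
            by_cases h2 : ((ls.map PySem.Str.strip).foldl pvGroupStep ([], [])).2 ≠ [] <;>
              simp [h2, hpb]
        · -- current dict non-empty: A flushes; B cuts a block that the filter keeps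
          have hc : curLines ≠ [] := by
            intro h; rw [h] at hi; simp [PySem.Dict.empty] at hi
          have hA : pvAStep (pkgs, curLines.foldl pvParseLine PySem.Dict.empty) l
              = (pkgs ++ [(curLines.foldl pvParseLine PySem.Dict.empty).items],
                 PySem.Dict.empty) := by
            simp [pvAStep, hl, hi]
          rw [hA, show (PySem.Dict.empty : PySem.Dict String String)
                = List.foldl pvParseLine PySem.Dict.empty [] from rfl, ih,
              show pvGroupStep (([] : List (List String)), curLines) (PySem.Str.strip l)
                  = ([curLines], []) by simp [pvGroupStep, hl, hc],
              pvGroup_acc ((ls.map PySem.Str.strip)) [curLines] []]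
          have hpb : pvParseBlock curLines
              = (curLines.foldl pvParseLine PySem.Dict.empty).items := rfl
          by_cases h2 : ((ls.map PySem.Str.strip).foldl pvGroupStep ([], [])).2 ≠ [] <;>
            simp [h2, hpb, hi]
      · -- non-blank line: A parses it into the dict; B appends it to the current block
        rw [pvAStep_nonblank _ _ _ hl, show pvParseLine (curLines.foldl pvParseLine PySem.Dict.empty)
                (PySem.Str.strip l)
              = (curLines ++ [PySem.Str.strip l]).foldl pvParseLine PySem.Dict.empty by
            simp, ih,
          show pvGroupStep (([] : List (List String)), curLines) (PySem.Str.strip l)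
              = ([], curLines ++ [PySem.Str.strip l]) by simp [pvGroupStep, hl]]

-- ===== VERDICT (by name: the statement is the Claim_ definition above) =====
theorem parse_packages_data_spec : Claim_equal_parse_packages_data := by
  intro data _
  show _ = _
  unfold parse_packages_data parse_packages_data_alt
  simpa using pvMain (PySem.Str.splitlines data) [] []
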